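-- pv_equiv track=rewrite | github.com/dcharatan/meshtryoshka | meshtryoshka/utils.py | get_value_for_step
-- ===== SOURCE A (Python) =====
-- from typing import TypeVar
--
-- T = TypeVar("T")
--
-- def get_value_for_step(step: int, schedule: dict[int, T]) -> T:
--     newest_step = None
--     newest_value = None
--
--     # Find the newest step that is less than or equal to the current step.
--     for schedule_step, value in schedule.items():
--         if step < schedule_step:
--             continue
--         if newest_step is None or schedule_step > newest_step:
--             newest_step = schedule_step
--             newest_value = value
--
--     assert newest_value is not None
--     return newest_value
-- ===== SOURCE B (Python) =====
-- def get_value_for_step(step: int, schedule):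
--     # Sort the entries by key in descending order, then return the value of
--     # the first key that is <= step.
--     for schedule_step, value in sorted(schedule.items(), key=lambda p: p[0], reverse=True):
--         if schedule_step <= step:
--             return value
--     raise AssertionError
-- ===== Notes on version B (the rewrite author's own statement) =====
-- stated objective: simpler
-- what changed: Replaces the None-sentinel max-tracking scan with sorting the entries by key in descending order and returning the value of the first key <= step; Pre_ excludes inputs where no key is <= step (AssertionError in both) and assoc lists with duplicate keys, which a Python dict cannot represent.
import Mathlib
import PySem

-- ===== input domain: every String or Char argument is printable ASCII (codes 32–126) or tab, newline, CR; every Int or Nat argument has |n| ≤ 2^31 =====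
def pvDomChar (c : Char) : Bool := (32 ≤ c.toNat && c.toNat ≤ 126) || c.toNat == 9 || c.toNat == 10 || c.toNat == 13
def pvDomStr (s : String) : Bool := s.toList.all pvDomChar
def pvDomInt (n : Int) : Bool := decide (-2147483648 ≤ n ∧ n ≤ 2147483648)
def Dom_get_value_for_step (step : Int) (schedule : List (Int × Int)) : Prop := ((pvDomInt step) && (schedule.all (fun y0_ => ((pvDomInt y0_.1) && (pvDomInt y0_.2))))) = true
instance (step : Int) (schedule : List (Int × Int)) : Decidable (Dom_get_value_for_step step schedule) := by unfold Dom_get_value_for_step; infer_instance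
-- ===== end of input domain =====

-- B replaces A's None-sentinel max-tracking scan by sort-keys-descending then take the first eligible entry (objective: simpler).


-- ===== PORT A =====
-- one loop step of A: skip entries with step < key, else keep the newest (largest) key seen so far
def stepA (step : Int) (st : Option (Int × Int)) (p : Int × Int) : Option (Int × Int) :=
  if step < p.1 then st
  else
    match st with
    | none => some p
    | some q => if p.1 > q.1 then some p else st

def get_value_for_step (step : Int) (schedule : List (Int × Int)) : Int :=
  match schedule.foldl (stepA step) none with
  | some q => q.2
  | none => 0   -- 'assert newest_value is not None' fails: excluded by Pre_

-- ===== PORT B =====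
-- first pair of the (descending) list whose key is ≤ step
def firstLeB (step : Int) : List (Int × Int) → Option Int
  | [] => none
  | p :: t => if p.1 ≤ step then some p.2 else firstLeB step t

def get_value_for_step_alt (step : Int) (schedule : List (Int × Int)) : Int :=
  match firstLeB step (PySem.List.sorted schedule Prod.fst true) with
  | some v => v
  | none => 0   -- 'raise AssertionError': excluded by Pre_

-- ===== PRECONDITION & SPEC =====
-- Pre_ excludes (a) inputs where no key is ≤ step (both programs raise AssertionError) and
-- (b) lists with duplicate keys, which cannot arise from a Python dict.
def Pre_get_value_for_step (step : Int) (schedule : List (Int × Int)) : Prop :=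
  (schedule.map Prod.fst).Nodup ∧ ∃ p ∈ schedule, p.1 ≤ step
instance (step : Int) (schedule : List (Int × Int)) : Decidable (Pre_get_value_for_step step schedule) := by
  unfold Pre_get_value_for_step; infer_instance

def pvWitness_get_value_for_step : Int × (List (Int × Int)) := (5, [(0, 7), (10, 3)])

def Spec_get_value_for_step (step : Int) (schedule : List (Int × Int)) (out : Int) : Prop := out = get_value_for_step_alt step schedule
instance (step : Int) (schedule : List (Int × Int)) (out : Int) : Decidable (Spec_get_value_for_step step schedule out) := by unfold Spec_get_value_for_step; infer_instance

-- ===== CLAIM (what is proved, stated in full; the proofs are below) =====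
def Claim_equal_get_value_for_step : Prop := ∀ (step : Int) (schedule : List (Int × Int)), Dom_get_value_for_step step schedule → Pre_get_value_for_step step schedule → Spec_get_value_for_step step schedule (get_value_for_step step schedule)

-- ===== LEMMAS AND PROOFS =====

lemma stepA_skip {step : Int} (st : Option (Int × Int)) {p : Int × Int} (h : step < p.1) :
    stepA step st p = st := by simp [stepA, h]

lemma stepA_none {step : Int} {p : Int × Int} (h : ¬ step < p.1) :
    stepA step none p = some p := by simp [stepA, h]

lemma stepA_some {step : Int} {p q : Int × Int} (h : ¬ step < p.1) :
    stepA step (some q) p = if p.1 > q.1 then some p else some q := by simp [stepA, h]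

-- A's fold: any produced result is an eligible entry and its key dominates all eligible keys.
lemma foldA_spec (step : Int) : ∀ (l : List (Int × Int)) (st : Option (Int × Int)) (r : Int × Int),
    l.foldl (stepA step) st = some r →
    (∀ q, st = some q → q.1 ≤ step) →
    (r.1 ≤ step ∧ (r ∈ l ∨ st = some r) ∧ (∀ p ∈ l, p.1 ≤ step → p.1 ≤ r.1) ∧ (∀ q, st = some q → q.1 ≤ r.1)) := by
  intro l
  induction l with
  | nil =>
    intro st r h hst
    simp only [List.foldl_nil] at h
    exact ⟨hst r h, Or.inr h, by simp, fun q hq => by rw [hq] at h; cases h; exact le_refl _⟩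
  | cons p t ih =>
    intro st r h hst
    simp only [List.foldl_cons] at h
    have hst' : ∀ q, stepA step st p = some q → q.1 ≤ step := by
      intro q hq
      by_cases h1 : step < p.1
      · rw [stepA_skip st h1] at hq; exact hst q hq
      · cases st with
        | none => rw [stepA_none h1] at hq; cases hq; omega
        | some q' =>
          rw [stepA_some h1] at hq
          split_ifs at hq with h2
          · cases hq; omega
          · cases hq; exact hst q rfl
    obtain ⟨h1, h2, h3, h4⟩ := ih (stepA step st p) r h hst'
    have hmono : ∀ q, st = some q → ∃ q', stepA step st p = some q' ∧ q.1 ≤ q'.1 := by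
      intro q hq
      subst hq
      by_cases hs : step < p.1
      · rw [stepA_skip _ hs]; exact ⟨q, rfl, le_refl _⟩
      · rw [stepA_some hs]
        by_cases h2' : p.1 > q.1
        · rw [if_pos h2']; exact ⟨p, rfl, by omega⟩
        · rw [if_neg h2']; exact ⟨q, rfl, le_refl _⟩
    refine ⟨h1, ?_, ?_, ?_⟩
    · rcases h2 with hm | he
      · exact Or.inl (List.mem_cons_of_mem _ hm)
      · by_cases hs : step < p.1
        · rw [stepA_skip st hs] at he; exact Or.inr he
        · cases st with
          | none => rw [stepA_none hs] at he; cases he; exact Or.inl List.mem_cons_self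
          | some q' =>
            rw [stepA_some hs] at he
            split_ifs at he with h2'
            · cases he; exact Or.inl List.mem_cons_self
            · exact Or.inr he
    · intro q hq hqle
      rcases List.mem_cons.mp hq with rfl | hqt
      · -- q = p: after this step the state key is ≥ p.1
        have : ∃ q', stepA step st q = some q' ∧ q.1 ≤ q'.1 := by
          cases st with
          | none => rw [stepA_none (by omega)]; exact ⟨q, rfl, le_refl _⟩
          | some q' =>
            rw [stepA_some (by omega)]
            by_cases h2' : q.1 > q'.1
            · rw [if_pos h2']; exact ⟨q, rfl, le_refl _⟩
            · rw [if_neg h2']; exact ⟨q', rfl, by omega⟩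
        obtain ⟨q', hq', hle⟩ := this
        exact le_trans hle (h4 q' hq')
      · exact h3 q hqt hqle
    · intro q hq
      obtain ⟨q', hq', hle⟩ := hmono q hq
      exact le_trans hle (h4 q' hq')

-- A's fold returns some result when an eligible entry exists.
lemma foldA_isSome (step : Int) : ∀ (l : List (Int × Int)) (st : Option (Int × Int)),
    ((∃ p ∈ l, p.1 ≤ step) ∨ st.isSome) → (l.foldl (stepA step) st).isSome := by
  intro l
  induction l with
  | nil =>
    intro st h
    simp only [List.foldl_nil]
    rcases h with ⟨p, hp, _⟩ | h
    · simp at hp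
    · exact h
  | cons p t ih =>
    intro st h
    simp only [List.foldl_cons]
    apply ih
    have hkeep : st.isSome → (stepA step st p).isSome := by
      intro hs
      by_cases h1 : step < p.1
      · rw [stepA_skip st h1]; exact hs
      · cases st with
        | none => rw [stepA_none h1]; rfl
        | some q' => rw [stepA_some h1]; split_ifs <;> rfl
    rcases h with ⟨q, hq, hqle⟩ | hs
    · rcases List.mem_cons.mp hq with rfl | hqt
      · right
        cases st with
        | none => rw [stepA_none (by omega)]; rfl
        | some q' => rw [stepA_some (by omega)]; split_ifs <;> rfl
      · exact Or.inl ⟨q, hqt, hqle⟩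
    · exact Or.inr (hkeep hs)

-- B's scan over a key-descending list: the produced value comes from an eligible entry
-- whose key dominates all eligible keys of the list.
lemma firstLeB_spec (step : Int) : ∀ (l : List (Int × Int)),
    l.Pairwise (fun a b => b.1 ≤ a.1) →
    ∀ v, firstLeB step l = some v →
    ∃ p ∈ l, p.2 = v ∧ p.1 ≤ step ∧ ∀ q ∈ l, q.1 ≤ step → q.1 ≤ p.1 := by
  intro l
  induction l with
  | nil => intro _ v h; simp [firstLeB] at h
  | cons p t ih =>
    intro hpw v h
    rw [List.pairwise_cons] at hpw
    unfold firstLeB at h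
    split_ifs at h with h1
    · cases h
      exact ⟨p, List.mem_cons_self, rfl, h1, by
        intro q hq _
        rcases List.mem_cons.mp hq with rfl | hqt
        · exact le_refl _
        · exact hpw.1 q hqt⟩
    · obtain ⟨q, hqt, hv, hqle, hmax⟩ := ih hpw.2 v h
      exact ⟨q, List.mem_cons_of_mem _ hqt, hv, hqle, by
        intro r hr hrle
        rcases List.mem_cons.mp hr with rfl | hrt
        · omega
        · exact hmax r hrt hrle⟩

lemma firstLeB_isSome (step : Int) : ∀ (l : List (Int × Int)),
    (∃ p ∈ l, p.1 ≤ step) → (firstLeB step l).isSome := by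
  intro l
  induction l with
  | nil => intro h; simp at h
  | cons p t ih =>
    intro ⟨q, hq, hqle⟩
    unfold firstLeB
    split_ifs with h1
    · rfl
    · apply ih
      rcases List.mem_cons.mp hq with rfl | hqt
      · omega
      · exact ⟨q, hqt, hqle⟩

-- distinct keys: entries with equal keys are equal
lemma eq_of_nodup_keys : ∀ (l : List (Int × Int)), (l.map Prod.fst).Nodup →
    ∀ a ∈ l, ∀ b ∈ l, a.1 = b.1 → a = b := by
  intro l
  induction l with
  | nil => intro _ a ha; simp at ha
  | cons p t ih =>
    intro hnd a ha b hb hab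
    simp only [List.map_cons, List.nodup_cons] at hnd
    rcases List.mem_cons.mp ha with rfl | hat <;> rcases List.mem_cons.mp hb with rfl | hbt
    · rfl
    · exact absurd (List.mem_map.mpr ⟨b, hbt, hab.symm⟩) hnd.1
    · exact absurd (List.mem_map.mpr ⟨a, hat, hab⟩) hnd.1
    · exact ih hnd.2 a hat b hbt hab

-- ===== VERDICT (by name: the statement is the Claim_ definition above) =====
theorem get_value_for_step_spec : Claim_equal_get_value_for_step := by
  intro step schedule _ hpre
  obtain ⟨hnd, hex⟩ := hpre
  unfold Spec_get_value_for_step get_value_for_step get_value_for_step_alt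
  -- both scans produce a result
  have hA := foldA_isSome step schedule none (Or.inl hex)
  set sl := PySem.List.sorted schedule Prod.fst true with hsl
  have hperm : sl.Perm schedule := PySem.List.sorted_perm schedule Prod.fst true
  have hexB : ∃ p ∈ sl, p.1 ≤ step := by
    obtain ⟨p, hp, hple⟩ := hex
    exact ⟨p, hperm.mem_iff.mpr hp, hple⟩
  have hB := firstLeB_isSome step sl hexB
  obtain ⟨rA, hrA⟩ := Option.isSome_iff_exists.mp hA
  obtain ⟨vB, hvB⟩ := Option.isSome_iff_exists.mp hB
  -- characterize both results
  obtain ⟨hAle, hAin, hAmax, -⟩ := foldA_spec step schedule none rA hrA (by simp)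
  have hAin' : rA ∈ schedule := by
    rcases hAin with h | h
    · exact h
    · exact absurd h (by simp)
  have hpw : sl.Pairwise (fun a b => b.1 ≤ a.1) :=
    PySem.List.sorted_pairwise_rev schedule Prod.fst
  obtain ⟨pB, hpBin, hpBv, hpBle, hpBmax⟩ := firstLeB_spec step sl hpw vB hvB
  have hpBin' : pB ∈ schedule := hperm.mem_iff.mp hpBin
  -- the two picked entries have the same key, hence are equal
  have h1 : rA.1 ≤ pB.1 := hpBmax rA (hperm.mem_iff.mpr hAin') hAle
  have h2 : pB.1 ≤ rA.1 := hAmax pB hpBin' hpBle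
  have heq : rA = pB := eq_of_nodup_keys schedule hnd rA hAin' pB hpBin' (by omega)
  rw [hrA, hvB]
  show rA.2 = vB
  rw [heq]
  exact hpBv
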